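-- pv_equiv track=rewrite | github.com/seifreed/yaraast | yaraast/lsp/document_query_reference_text.py | mask_non_code_segments
-- ===== SOURCE A (Python) =====
-- def mask_non_code_segments(line: str) -> str:
--     chars = list(line)
--     in_string = False
--     escape = False
--     for idx, char in enumerate(chars):
--         if escape:
--             chars[idx] = " "
--             escape = False
--             continue
--         if char == "\\" and in_string:
--             chars[idx] = " "
--             escape = True
--             continue
--         if char == '"':
--             chars[idx] = " "
--             in_string = not in_string
--             continue
--         if in_string:
--             chars[idx] = " "
--             continue
--         if char == "/" and idx + 1 < len(chars) and chars[idx + 1] == "/":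
--             for comment_idx in range(idx, len(chars)):
--                 chars[comment_idx] = " "
--             break
--     return "".join(chars)
-- ===== SOURCE B (Python) =====
-- def mask_non_code_segments(line: str) -> str:
--     # Segment-based scan: jump over whole string literals and to-EOL comments,
--     # emitting a run of spaces per segment, instead of a per-char state machine.
--     out = []
--     i = 0
--     n = len(line)
--     while i < n:
--         c = line[i]
--         if c == '"':
--             j = i + 1
--             while j < n:
--                 if line[j] == '\\':
--                     j += 2
--                 elif line[j] == '"':
--                     j += 1
--                     break
--                 else:
--                     j += 1
--             j = min(j, n)
--             out.append(' ' * (j - i))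
--             i = j
--         elif c == '/' and i + 1 < n and line[i + 1] == '/':
--             out.append(' ' * (n - i))
--             i = n
--         else:
--             out.append(c)
--             i += 1
--     return ''.join(out)
-- ===== Notes on version B (the rewrite author's own statement) =====
-- stated objective: alternative
-- what changed: Replaced the per-character escape/in_string state machine with a segment-based scanner that jumps over whole string literals and to-EOL comments, emitting a run of spaces per segment.
import Mathlib
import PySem

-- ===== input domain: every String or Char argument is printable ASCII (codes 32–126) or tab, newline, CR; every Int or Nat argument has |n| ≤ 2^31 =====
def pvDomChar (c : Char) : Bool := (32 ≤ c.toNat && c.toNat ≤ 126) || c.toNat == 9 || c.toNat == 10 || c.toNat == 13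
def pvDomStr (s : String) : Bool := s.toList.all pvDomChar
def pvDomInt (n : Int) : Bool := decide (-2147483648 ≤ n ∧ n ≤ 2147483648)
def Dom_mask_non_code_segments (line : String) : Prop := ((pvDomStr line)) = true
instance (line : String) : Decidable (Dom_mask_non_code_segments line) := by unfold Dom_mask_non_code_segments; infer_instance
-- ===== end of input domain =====

-- B replaces A's per-character (in_string, escape) state machine by a segment scanner
-- that jumps over whole string literals / to-EOL comments; same output, same cost.

-- ===== PORT A =====
-- A's enumerate loop with (in_string, escape) state; the inner comment loop + break
-- becomes filling the remainder of the line with spaces.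
def maskA : List Char → Bool → Bool → List Char
  | [], _, _ => []
  | c :: rest, inStr, esc =>
    if esc then ' ' :: maskA rest inStr false
    else if c = '\\' ∧ inStr then ' ' :: maskA rest inStr true
    else if c = '"' then ' ' :: maskA rest (!inStr) false
    else if inStr then ' ' :: maskA rest inStr false
    else if c = '/' ∧ rest.head? = some '/' then List.replicate (rest.length + 1) ' '
    else c :: maskA rest inStr false

def mask_non_code_segments (line : String) : String :=
  String.ofList (maskA line.toList false false)

-- ===== PORT B =====
-- B's inner while loop: how many characters of the string body (after the opening
-- quote) are consumed, including the closing quote; a backslash consumes two.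
def strEnd : List Char → Nat
  | [] => 0
  | c :: rest =>
    if c = '\\' then
      match rest with
      | [] => 1
      | _ :: r => 2 + strEnd r
    else if c = '"' then 1
    else 1 + strEnd rest

-- B's outer while loop over segments.
def maskB : List Char → List Char
  | [] => []
  | c :: rest =>
    if c = '"' then
      let k := strEnd rest
      ' ' :: (List.replicate k ' ' ++ maskB (rest.drop k))
    else if c = '/' ∧ rest.head? = some '/' then
      List.replicate (rest.length + 1) ' '
    else c :: maskB rest
termination_by l => l.length
decreasing_by all_goals simp

def mask_non_code_segments_alt (line : String) : String :=
  String.ofList (maskB line.toList)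

-- ===== PRECONDITION & SPEC =====
def Spec_mask_non_code_segments (line : String) (out : String) : Prop := out = mask_non_code_segments_alt line
instance (line : String) (out : String) : Decidable (Spec_mask_non_code_segments line out) := by unfold Spec_mask_non_code_segments; infer_instance

-- ===== CLAIM (what is proved, stated in full; the proofs are below) =====
def Claim_equal_mask_non_code_segments : Prop := ∀ (line : String), Dom_mask_non_code_segments line → Spec_mask_non_code_segments line (mask_non_code_segments line)

-- ===== LEMMAS AND PROOFS =====

theorem strEnd_quote (rest : List Char) : strEnd ('"' :: rest) = 1 := by
  rw [strEnd.eq_def]; simp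

theorem strEnd_bs (d : Char) (r : List Char) : strEnd ('\\' :: d :: r) = 2 + strEnd r := by
  rw [strEnd.eq_def]; simp

theorem strEnd_other (c : Char) (rest : List Char) (h1 : ¬ c = '\\') (h2 : ¬ c = '"') :
    strEnd (c :: rest) = 1 + strEnd rest := by
  rw [strEnd.eq_def]; simp [h1, h2]

theorem strEnd_bs_nil : strEnd ['\\'] = 1 := by
  rw [strEnd.eq_def]; simp

theorem maskB_nil : maskB [] = [] := by rw [maskB]

theorem maskB_quote (rest : List Char) :
    maskB ('"' :: rest) = ' ' :: (List.replicate (strEnd rest) ' ' ++ maskB (rest.drop (strEnd rest))) := by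
  rw [maskB]; simp

theorem maskB_comment (c : Char) (rest : List Char) (h : c = '/' ∧ rest.head? = some '/') :
    maskB (c :: rest) = List.replicate (rest.length + 1) ' ' := by
  rw [maskB]; simp [h.1, h.2]

theorem maskB_other (c : Char) (rest : List Char) (h1 : ¬ c = '"')
    (h2 : ¬ (c = '/' ∧ rest.head? = some '/')) : maskB (c :: rest) = c :: maskB rest := by
  rw [maskB]; simp [h1, h2]

theorem maskA_cons (c : Char) (rest : List Char) (inStr esc : Bool) : maskA (c :: rest) inStr esc =
    (if esc then ' ' :: maskA rest inStr false
    else if c = '\\' ∧ inStr then ' ' :: maskA rest inStr true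
    else if c = '"' then ' ' :: maskA rest (!inStr) false
    else if inStr then ' ' :: maskA rest inStr false
    else if c = '/' ∧ rest.head? = some '/' then List.replicate (rest.length + 1) ' '
    else c :: maskA rest inStr false) := by
  rw [maskA]

-- joint induction on length: out of a string A = B, and inside a string A emits
-- spaces for exactly strEnd characters and then resumes out of the string
theorem maskA_eq_maskB_aux : ∀ (n : Nat) (l : List Char), l.length ≤ n →
    maskA l false false = maskB l ∧
    maskA l true false = List.replicate (strEnd l) ' ' ++ maskB (l.drop (strEnd l)) := by
  intro n
  induction n with
  | zero =>
    intro l h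
    have hl : l = [] := List.eq_nil_of_length_eq_zero (Nat.le_zero.mp h)
    subst hl; simp [maskA, maskB, strEnd]
  | succ n ih =>
    intro l h
    match l with
    | [] => simp [maskA, maskB, strEnd]
    | c :: rest =>
      have hr : rest.length ≤ n := by simp at h; omega
      constructor
      · -- out of string
        by_cases hq : c = '"'
        · subst hq
          rw [maskA_cons, maskB_quote]
          simp [(ih rest hr).2]
        · by_cases hc : c = '/' ∧ rest.head? = some '/'
          · rw [maskA_cons, maskB_comment c rest hc]
            simp [hc.1, hc.2]
          · rw [maskA_cons, maskB_other c rest hq hc]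
            simp [hq, hc, (ih rest hr).1]
      · -- inside string
        by_cases hb : c = '\\'
        · subst hb
          match rest with
          | [] =>
            rw [maskA_cons]
            simp [maskA, strEnd_bs_nil, maskB_nil]
          | d :: r =>
            have hr2 : r.length ≤ n := by simp at h; omega
            have h2 : 2 + strEnd r = strEnd r + 2 := Nat.add_comm _ _
            rw [maskA_cons, strEnd_bs, h2]
            simp [List.replicate_succ]
            rw [maskA_cons]
            simp [(ih r hr2).2]
        · by_cases hq : c = '"'
          · subst hq
            rw [maskA_cons, strEnd_quote]
            simp [(ih rest hr).1]
          · rw [maskA_cons, strEnd_other c rest hb hq]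
            have h2 : 1 + strEnd rest = strEnd rest + 1 := Nat.add_comm _ _
            rw [h2]
            simp [hb, hq, List.replicate_succ, (ih rest hr).2]

-- ===== VERDICT (by name: the statement is the Claim_ definition above) =====
theorem mask_non_code_segments_spec : Claim_equal_mask_non_code_segments := by
  intro line _
  unfold Spec_mask_non_code_segments mask_non_code_segments mask_non_code_segments_alt
  exact congrArg String.ofList (maskA_eq_maskB_aux line.toList.length line.toList le_rfl).1
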